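-- pv_equiv track=rewrite | github.com/timstevens1/go_fish | Turns_difficulty_no_suits2_13_5_23.py | make_books
-- ===== SOURCE A (Python) =====
-- def make_books(player, counter):
--     # index of rank array is a mapping to num_decks
--     ranks = ['A','2','3','4','5','6','7','8','9','10','J','Q','K']
--     # counters of number of cards of a given rank in the hand
--     num_decks = [0,0,0,0,0,0,0,0,0,0,0,0,0]
--     for card in player:
--         # increments appropriate rank counter for each card
--         num_decks[ranks.index(card)] +=1
--     for i in range(12):
--         # 4 cards of a rank in the hand
--         if num_decks[i]>= 4:
--             # increment deck counter
--             counter+=1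
--             # remove deck from hand
--             player = [x for x in player if not ranks[i] in x]
--     return player, counter
-- ===== SOURCE B (Python) =====
-- def make_books(player, counter):
--     ranks = ['A','2','3','4','5','6','7','8','9','10','J','Q','K']
--     counts = [0] * 13
--     for card in player:
--         counts[ranks.index(card)] += 1
--     booked = [r for r, c in zip(ranks[:12], counts[:12]) if c >= 4]
--     return [x for x in player if x not in booked], counter + len(booked)
-- ===== Notes on version B (the rewrite author's own statement) =====
-- stated objective: simpler
-- what changed: Instead of rebuilding the whole hand once per completed book inside the per-rank loop, B collects the booked ranks in one pass over the counts table and filters the hand exactly once by membership in that list.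
import Mathlib
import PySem

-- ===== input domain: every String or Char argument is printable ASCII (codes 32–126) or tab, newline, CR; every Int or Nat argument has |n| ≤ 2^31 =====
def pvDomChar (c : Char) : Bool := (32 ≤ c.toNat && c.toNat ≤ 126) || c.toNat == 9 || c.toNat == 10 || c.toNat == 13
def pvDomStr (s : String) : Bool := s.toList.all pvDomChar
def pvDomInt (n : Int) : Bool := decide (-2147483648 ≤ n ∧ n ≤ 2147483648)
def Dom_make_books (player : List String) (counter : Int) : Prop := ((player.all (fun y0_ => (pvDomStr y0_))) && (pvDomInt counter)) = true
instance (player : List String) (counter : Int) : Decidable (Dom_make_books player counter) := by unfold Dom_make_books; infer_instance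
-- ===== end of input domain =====

-- B replaces A's per-book rebuild of the hand (one list rebuild per completed rank) by collecting
-- the booked ranks in one pass over the counts table and filtering the hand exactly once (simpler).

-- ===== PORT A =====
-- the literal `ranks` list of the Python source (shared by both ports, as in both Pythons)
def pvRanks : List String := ["A","2","3","4","5","6","7","8","9","10","J","Q","K"]

-- `for card in player: num_decks[ranks.index(card)] += 1` (ranks.index raises ValueError on a
-- card not in ranks — those inputs are excluded by Pre_; the `none` branch is unreachable there)
def pvCount (player : List String) : List Int :=
  player.foldl
    (fun nd card =>
      match PySem.List.index? pvRanks card with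
      | some i => nd.set i (nd.getD i 0 + 1)
      | none => nd)
    [0,0,0,0,0,0,0,0,0,0,0,0,0]

def make_books (player : List String) (counter : Int) : List String × Int :=
  let num_decks := pvCount player
  (PySem.List.pyRange 0 12 1).foldl
    (fun st i =>
      if 4 ≤ PySem.List.pyGetD num_decks i 0 then
        (st.1.filter (fun x => !(PySem.Str.isIn (PySem.List.pyGetD pvRanks i "") x)), st.2 + 1)
      else st)
    (player, counter)

-- ===== PORT B =====
def make_books_alt (player : List String) (counter : Int) : List String × Int :=
  let counts := pvCount player
  let booked := (((pvRanks.take 12).zip (counts.take 12)).filter (fun p => 4 ≤ p.2)).map Prod.fst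
  (player.filter (fun x => !(booked.contains x)), counter + booked.length)

-- ===== PRECONDITION & SPEC =====
-- Pre_ excludes exactly the inputs where Python A raises: ranks.index(card) raises ValueError
-- when some card of the hand is not one of the 13 rank strings.
def Pre_make_books (player : List String) (counter : Int) : Prop :=
  ∀ card ∈ player, card ∈ (["A","2","3","4","5","6","7","8","9","10","J","Q","K"] : List String)
instance (player : List String) (counter : Int) : Decidable (Pre_make_books player counter) := by
  unfold Pre_make_books; infer_instance

def pvWitness_make_books : List String × Int := (["A","A","A","A","K"], 0)

def Spec_make_books (player : List String) (counter : Int) (out : List String × Int) : Prop := out = make_books_alt player counter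
instance (player : List String) (counter : Int) (out : List String × Int) : Decidable (Spec_make_books player counter out) := by unfold Spec_make_books; infer_instance

-- ===== CLAIM (what is proved, stated in full; the proofs are below) =====
def Claim_equal_make_books : Prop := ∀ (player : List String) (counter : Int), Dom_make_books player counter → Pre_make_books player counter → Spec_make_books player counter (make_books player counter)

-- ===== LEMMAS AND PROOFS =====

-- the counting fold preserves the length of the table
theorem pvCount_length (player : List String) : (pvCount player).length = 13 := by
  unfold pvCount
  suffices h : ∀ (l : List String) (nd : List Int),
      (l.foldl (fun nd card =>
        match PySem.List.index? pvRanks card with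
        | some i => nd.set i (nd.getD i 0 + 1)
        | none => nd) nd).length = nd.length from h player _
  intro l
  induction l with
  | nil => intro nd; rfl
  | cons c t ih =>
    intro nd
    simp only [List.foldl_cons]
    rw [ih]
    cases PySem.List.index? pvRanks c <;> simp

-- for two rank strings, Python's substring test `ranks[i] in x` coincides with equality
theorem pv_isIn_eq : ∀ x ∈ pvRanks, ∀ r ∈ pvRanks.take 12,
    PySem.Str.isIn r x = (x == r) := by decide

-- A's per-book filter loop over (rank, count) pairs equals one membership filter plus length add
theorem pv_loop_eq (L : List (String × Int)) (player : List String) (counter : Int)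
    (h : ∀ x ∈ player, ∀ p ∈ L, PySem.Str.isIn p.1 x = (x == p.1)) :
    L.foldl
      (fun st p =>
        if 4 ≤ p.2 then (st.1.filter (fun x => !(PySem.Str.isIn p.1 x)), st.2 + 1) else st)
      (player, counter)
    = (player.filter (fun x => !(((L.filter (fun p => 4 ≤ p.2)).map Prod.fst).contains x)),
       counter + ((L.filter (fun p => 4 ≤ p.2)).map Prod.fst).length) := by
  induction L generalizing player counter with
  | nil => simp
  | cons p t ih =>
    by_cases hp : 4 ≤ p.2
    · have hf : player.filter (fun x => !(PySem.Str.isIn p.1 x))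
          = player.filter (fun x => !(x == p.1)) :=
        List.filter_congr (fun x hx => by rw [h x hx p (List.mem_cons_self)])
      simp only [List.foldl_cons, if_pos hp, hf]
      rw [ih _ _ (fun x hx q hq => h x (List.mem_of_mem_filter hx) q (List.mem_cons_of_mem _ hq))]
      simp only [List.filter_cons, hp, decide_true, if_pos, List.map_cons, List.length_cons,
        Prod.mk.injEq]
      constructor
      · rw [List.filter_filter]
        refine List.filter_congr (fun x _ => ?_)
        simp [Bool.and_comm]
      · push_cast; ring
    · simp only [List.foldl_cons, if_neg hp]
      rw [ih _ _ (fun x hx q hq => h x hx q (List.mem_cons_of_mem _ hq))]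
      simp only [List.filter_cons, hp, decide_false]
      simp

-- with a destructed 13-entry counts table, A's index loop is the fold over the zipped pairs
theorem pv_bridge (c0 c1 c2 c3 c4 c5 c6 c7 c8 c9 c10 c11 c12 : Int)
    (player : List String) (counter : Int) :
    (PySem.List.pyRange 0 12 1).foldl
      (fun st i =>
        if 4 ≤ PySem.List.pyGetD ([c0,c1,c2,c3,c4,c5,c6,c7,c8,c9,c10,c11,c12] : List Int) i 0 then
          (st.1.filter (fun x => !(PySem.Str.isIn (PySem.List.pyGetD pvRanks i "") x)), st.2 + 1)
        else st)
      (player, counter)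
    = ((pvRanks.take 12).zip (([c0,c1,c2,c3,c4,c5,c6,c7,c8,c9,c10,c11,c12] : List Int).take 12)).foldl
        (fun st p =>
          if 4 ≤ p.2 then (st.1.filter (fun x => !(PySem.Str.isIn p.1 x)), st.2 + 1) else st)
        (player, counter) := by
  rfl

-- ===== VERDICT (by name: the statement is the Claim_ definition above) =====
theorem make_books_spec : Claim_equal_make_books := by
  intro player counter _ hpre
  unfold Spec_make_books
  show make_books player counter = make_books_alt player counter
  unfold make_books make_books_alt
  have hlen := pvCount_length player
  generalize hC : pvCount player = counts at *
  rcases counts with _|⟨c0,_|⟨c1,_|⟨c2,_|⟨c3,_|⟨c4,_|⟨c5,_|⟨c6,_|⟨c7,_|⟨c8,_|⟨c9,_|⟨c10,_|⟨c11,_|⟨c12,rest⟩⟩⟩⟩⟩⟩⟩⟩⟩⟩⟩⟩⟩ <;>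
      simp only [List.length_cons, List.length_nil] at hlen <;> try omega
  obtain rfl : rest = [] := List.length_eq_zero_iff.mp (by omega)
  have h : ∀ x ∈ player, ∀ p ∈ (pvRanks.take 12).zip (([c0,c1,c2,c3,c4,c5,c6,c7,c8,c9,c10,c11,c12] : List Int).take 12),
      PySem.Str.isIn p.1 x = (x == p.1) := by
    rintro x hx ⟨r,c⟩ hp
    exact pv_isIn_eq x (hpre x hx) r (List.of_mem_zip hp).1
  rw [pv_bridge, pv_loop_eq _ _ _ h]
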